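-- pv_equiv track=rewrite | github.com/dnh-bot/dnh-werewolf-bot | temp_roles.py | check_ratio_roles
-- ===== SOURCE A (Python) =====
-- def check_ratio_roles(roles):
--     wolf_party = ['Werewolf', 'Superwolf', 'Betrayer']
--     third_party = ['Tanner', 'Cupid', 'Fox']
--     count_wolf, count_third_part = 0, 0
--     for role in roles:
--         if role in wolf_party:
--             count_wolf += roles[role]
--         elif role in third_party:
--             count_third_part += roles[role]
--     return count_wolf, count_third_part
-- ===== SOURCE B (Python) =====
-- def check_ratio_roles(roles):
--     count_wolf = sum(roles[r] for r in ('Werewolf', 'Superwolf', 'Betrayer') if r in roles)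
--     count_third_part = sum(roles[r] for r in ('Tanner', 'Cupid', 'Fox') if r in roles)
--     return count_wolf, count_third_part
-- ===== Notes on version B (the rewrite author's own statement) =====
-- stated objective: simpler
-- what changed: Instead of scanning the input dict with if/elif membership tests against the category lists, B iterates over the two fixed category lists and sums a guarded dict lookup for each known role, returning the pair directly.
import Mathlib
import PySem

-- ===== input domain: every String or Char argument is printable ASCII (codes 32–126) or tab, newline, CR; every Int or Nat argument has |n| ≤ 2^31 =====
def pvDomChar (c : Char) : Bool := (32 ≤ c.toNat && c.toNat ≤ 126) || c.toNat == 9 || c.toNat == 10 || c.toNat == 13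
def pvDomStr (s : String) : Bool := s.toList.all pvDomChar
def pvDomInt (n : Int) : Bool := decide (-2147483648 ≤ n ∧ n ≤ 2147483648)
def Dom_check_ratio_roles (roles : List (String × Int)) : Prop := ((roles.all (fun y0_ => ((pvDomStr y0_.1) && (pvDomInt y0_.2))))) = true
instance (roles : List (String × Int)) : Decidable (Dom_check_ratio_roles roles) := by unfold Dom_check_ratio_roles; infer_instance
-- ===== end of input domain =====

-- B replaces A's dict scan with if/elif membership tests by iterating the two fixed
-- category lists and summing a guarded lookup per known role (simpler decomposition).


-- ===== PORT A =====
-- 'roles[role]' while iterating the dict's keys: first-match lookup in the assoc list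
def check_ratio_roles (roles : List (String × Int)) : Int × Int :=
  let wolf_party : List String := ["Werewolf", "Superwolf", "Betrayer"]
  let third_party : List String := ["Tanner", "Cupid", "Fox"]
  roles.foldl (fun acc kv =>
    if kv.1 ∈ wolf_party then (acc.1 + (List.lookup kv.1 roles).getD 0, acc.2)
    else if kv.1 ∈ third_party then (acc.1, acc.2 + (List.lookup kv.1 roles).getD 0)
    else acc) (0, 0)

-- ===== PORT B =====
-- 'sum(roles[r] for r in names if r in roles)'
def pvSumRoles (roles : List (String × Int)) (names : List String) : Int :=
  names.foldl (fun s r =>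
    if roles.any (fun kv => kv.1 == r) then s + (List.lookup r roles).getD 0 else s) 0

def check_ratio_roles_alt (roles : List (String × Int)) : Int × Int :=
  (pvSumRoles roles ["Werewolf", "Superwolf", "Betrayer"],
   pvSumRoles roles ["Tanner", "Cupid", "Fox"])

-- ===== PRECONDITION & SPEC =====
-- Pre_ excludes association lists with duplicate keys: the Python argument is a dict,
-- whose keys are necessarily distinct, so no such input reaches A.
def Pre_check_ratio_roles (roles : List (String × Int)) : Prop :=
  (roles.map Prod.fst).Nodup

instance (roles : List (String × Int)) : Decidable (Pre_check_ratio_roles roles) := by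
  unfold Pre_check_ratio_roles; infer_instance

def pvWitness_check_ratio_roles : (List (String × Int)) :=
  [("Werewolf", 2), ("Fox", 1), ("Seer", 1)]

def Spec_check_ratio_roles (roles : List (String × Int)) (out : Int × Int) : Prop := out = check_ratio_roles_alt roles
instance (roles : List (String × Int)) (out : Int × Int) : Decidable (Spec_check_ratio_roles roles out) := by unfold Spec_check_ratio_roles; infer_instance

-- ===== CLAIM (what is proved, stated in full; the proofs are below) =====
def Claim_equal_check_ratio_roles : Prop := ∀ (roles : List (String × Int)), Dom_check_ratio_roles roles → Pre_check_ratio_roles roles → Spec_check_ratio_roles roles (check_ratio_roles roles)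

-- ===== LEMMAS AND PROOFS =====

-- first-match lookup of a present key in a nodup-key assoc list returns that entry's value
theorem lookup_of_nodup {roles : List (String × Int)} (h : (roles.map Prod.fst).Nodup)
    {kv : String × Int} (hm : kv ∈ roles) : List.lookup kv.1 roles = some kv.2 := by
  induction roles with
  | nil => cases hm
  | cons x xs ih =>
    simp only [List.map_cons, List.nodup_cons] at h
    rcases List.mem_cons.mp hm with rfl | hmem
    · simp [List.lookup]
    · have hne : kv.1 ≠ x.1 := by
        intro heq; exact h.1 (heq ▸ List.mem_map_of_mem hmem)
      have hb : (kv.1 == x.1) = false := beq_eq_false_iff_ne.mpr hne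
      simp [List.lookup, hb, ih h.2 hmem]

-- value-sum of the entries whose key lies in a fixed name list
def pvCatSum (roles : List (String × Int)) (names : List String) : Int :=
  ((roles.filter (fun kv => decide (kv.1 ∈ names))).map Prod.snd).sum

-- A's loop (over any sublist xs whose lookups are intact) accumulates the two category sums
theorem foldA_eq (roles : List (String × Int)) (xs : List (String × Int))
    (hlk : ∀ kv ∈ xs, List.lookup kv.1 roles = some kv.2) (a b : Int) :
    xs.foldl (fun acc kv =>
      if kv.1 ∈ (["Werewolf", "Superwolf", "Betrayer"] : List String) then
        (acc.1 + (List.lookup kv.1 roles).getD 0, acc.2)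
      else if kv.1 ∈ (["Tanner", "Cupid", "Fox"] : List String) then
        (acc.1, acc.2 + (List.lookup kv.1 roles).getD 0)
      else acc) (a, b)
    = (a + pvCatSum xs ["Werewolf", "Superwolf", "Betrayer"],
       b + pvCatSum xs ["Tanner", "Cupid", "Fox"]) := by
  induction xs generalizing a b with
  | nil => simp [pvCatSum]
  | cons kv xs ih =>
    obtain ⟨k, v⟩ := kv
    have hkv := hlk (k, v) (List.mem_cons_self ..)
    have hrest : ∀ kv' ∈ xs, List.lookup kv'.1 roles = some kv'.2 :=
      fun kv' h' => hlk kv' (List.mem_cons_of_mem _ h')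
    simp only [List.foldl_cons]
    by_cases hw : k ∈ (["Werewolf", "Superwolf", "Betrayer"] : List String)
    · rw [if_pos hw, ih hrest]
      simp only [List.mem_cons, List.not_mem_nil, or_false] at hw
      rcases hw with rfl | rfl | rfl <;>
        simp [pvCatSum, hkv, add_assoc]
    · by_cases ht : k ∈ (["Tanner", "Cupid", "Fox"] : List String)
      · rw [if_neg hw, if_pos ht, ih hrest]
        simp only [List.mem_cons, List.not_mem_nil, or_false] at ht
        rcases ht with rfl | rfl | rfl <;>
          simp [pvCatSum, hkv, add_assoc]
      · rw [if_neg hw, if_neg ht, ih hrest]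
        simp only [List.mem_cons, List.not_mem_nil, or_false, not_or] at hw ht
        simp [pvCatSum, hw, ht]

-- splitting a category sum at a fresh name
theorem pvCatSum_cons (roles : List (String × Int)) (r : String) (names : List String)
    (hr : r ∉ names) :
    pvCatSum roles (r :: names)
      = ((roles.filter (fun kv => kv.1 == r)).map Prod.snd).sum + pvCatSum roles names := by
  induction roles with
  | nil => simp [pvCatSum]
  | cons kv xs ih =>
    obtain ⟨k, v⟩ := kv
    by_cases h1 : k = r
    · subst h1
      simp [pvCatSum, hr] at ih ⊢
      omega
    · by_cases h2 : k ∈ names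
      · simp [pvCatSum, h1, h2] at ih ⊢
        omega
      · simp [pvCatSum, h1, h2] at ih ⊢
        omega

-- with distinct keys, the entries keyed r sum to the guarded lookup B performs
theorem filter_key_sum (roles : List (String × Int)) (h : (roles.map Prod.fst).Nodup)
    (r : String) :
    ((roles.filter (fun kv => kv.1 == r)).map Prod.snd).sum
      = (if roles.any (fun kv => kv.1 == r) then (List.lookup r roles).getD 0 else 0) := by
  induction roles with
  | nil => simp
  | cons kv xs ih =>
    obtain ⟨k, v⟩ := kv
    simp only [List.map_cons, List.nodup_cons] at h
    by_cases h1 : k = r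
    · subst h1
      have hnone : xs.filter (fun kv' => kv'.1 == k) = [] := by
        rw [List.filter_eq_nil_iff]
        intro kv' hm hbeq
        exact h.1 (((beq_iff_eq ..).mp hbeq) ▸ List.mem_map_of_mem hm)
      simp [List.lookup, hnone]
    · have b1 : (k == r) = false := beq_eq_false_iff_ne.mpr h1
      have b2 : (r == k) = false := beq_eq_false_iff_ne.mpr (Ne.symm h1)
      simp [List.lookup, b1, b2, ih h.2]
      simp only [b1, Bool.false_or]

-- B's per-category fold computes the same category sum
theorem sumRoles_eq (roles : List (String × Int)) (h : (roles.map Prod.fst).Nodup) :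
    ∀ names : List String, names.Nodup → pvSumRoles roles names = pvCatSum roles names := by
  have hfold : ∀ (L : List String) (s : Int),
      L.foldl (fun s r => if roles.any (fun kv => kv.1 == r)
          then s + (List.lookup r roles).getD 0 else s) s
        = s + (L.map (fun r => if roles.any (fun kv => kv.1 == r)
          then (List.lookup r roles).getD 0 else 0)).sum := by
    intro L
    induction L with
    | nil => intro s; simp
    | cons x L ihL =>
      intro s
      rw [List.foldl_cons, ihL, List.map_cons, List.sum_cons]
      by_cases hx : (roles.any fun kv => kv.1 == x) = true
      · rw [if_pos hx, if_pos hx]; ring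
      · rw [if_neg hx, if_neg hx]; ring
  intro names
  induction names with
  | nil => intro _; simp [pvSumRoles, pvCatSum]
  | cons r names ih =>
    intro hn
    simp only [List.nodup_cons] at hn
    have hstep : pvSumRoles roles (r :: names)
        = (if roles.any (fun kv => kv.1 == r) then (List.lookup r roles).getD 0 else 0)
            + pvSumRoles roles names := by
      unfold pvSumRoles
      rw [List.foldl_cons, hfold names, hfold names]
      by_cases hc : (roles.any fun kv => kv.1 == r) = true
      · rw [if_pos hc, if_pos hc]; ring
      · rw [if_neg hc, if_neg hc]; ring
    rw [hstep, ih hn.2, pvCatSum_cons roles r names hn.1, filter_key_sum roles h r]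

-- ===== VERDICT (by name: the statement is the Claim_ definition above) =====
theorem check_ratio_roles_spec : Claim_equal_check_ratio_roles := by
  intro roles _ hpre
  unfold Spec_check_ratio_roles check_ratio_roles_alt
  have hA : check_ratio_roles roles
      = roles.foldl (fun acc kv =>
          if kv.1 ∈ (["Werewolf", "Superwolf", "Betrayer"] : List String) then
            (acc.1 + (List.lookup kv.1 roles).getD 0, acc.2)
          else if kv.1 ∈ (["Tanner", "Cupid", "Fox"] : List String) then
            (acc.1, acc.2 + (List.lookup kv.1 roles).getD 0)
          else acc) (0, 0) := rfl
  rw [hA, foldA_eq roles roles (fun kv hm => lookup_of_nodup hpre hm) 0 0,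
    sumRoles_eq roles hpre ["Werewolf", "Superwolf", "Betrayer"] (by decide),
    sumRoles_eq roles hpre ["Tanner", "Cupid", "Fox"] (by decide)]
  simp
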